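-- pv_equiv track=rewrite | github.com/samconstans/wwcode_mit_spring2017 | Problem_set_3/ps3_c.py | is_valid_word_in_hand
-- ===== SOURCE A (Python) =====
-- def is_valid_word_in_hand(word, hand):
--     """
--     Returns True if word is entirely
--     composed of letters in the hand. Otherwise, returns False.
--     Does not mutate hand or wordList.
--
--     word: string
--     hand: dictionary (string -> int)
--
--     """
--     flag = True
--
--     hand_copy = hand.copy()
--
--     for letter in word:
--         if letter in hand_copy:
--             hand_copy[letter] -= 1
--         else:
--             return False
--
--     for i in hand_copy.values():
--         if i < 0:
--             flag = False
--     return flag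
-- ===== SOURCE B (Python) =====
-- def is_valid_word_in_hand(word, hand):
--     # count the word's letters once, then compare counts against hand; never mutates hand
--     wc = {}
--     for ch in word:
--         wc[ch] = wc.get(ch, 0) + 1
--     if all(ch in hand for ch in wc):
--         return all(wc.get(letter, 0) <= cnt for letter, cnt in hand.items())
--     return False
-- ===== Notes on version B (the rewrite author's own statement) =====
-- stated objective: alternative
-- what changed: Replaces A's copy-the-hand-then-decrement-per-letter-then-scan-for-negatives with a count-the-word-once-then-compare-counts decomposition that never builds or mutates a copy of hand.
import Mathlib
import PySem

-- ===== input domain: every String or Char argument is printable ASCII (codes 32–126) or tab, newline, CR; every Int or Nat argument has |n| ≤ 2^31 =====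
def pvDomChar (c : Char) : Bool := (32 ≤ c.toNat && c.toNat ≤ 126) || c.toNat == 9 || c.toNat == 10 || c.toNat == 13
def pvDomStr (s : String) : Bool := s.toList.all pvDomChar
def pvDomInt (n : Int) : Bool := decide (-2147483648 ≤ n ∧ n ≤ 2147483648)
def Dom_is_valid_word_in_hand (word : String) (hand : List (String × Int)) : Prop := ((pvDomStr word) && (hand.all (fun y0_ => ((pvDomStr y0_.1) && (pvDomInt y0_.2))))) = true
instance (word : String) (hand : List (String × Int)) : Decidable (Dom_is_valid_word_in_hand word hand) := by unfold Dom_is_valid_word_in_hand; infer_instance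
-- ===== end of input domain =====

-- B re-decomposes A (copy hand, decrement per word letter, scan for negatives) as
-- count-the-word-once-then-compare-counts; same cost, no copy/mutation of hand (objective: alternative).

-- ===== PORT A =====
-- A's 'for letter in word' loop over the copy: decrement, or early-return False (none) on a missing letter
def pvALoop : List Char → PySem.Dict String Int → Option (PySem.Dict String Int)
  | [], d => some d
  | c :: cs, d =>
      if d.contains (String.singleton c) then
        pvALoop cs (d.modify (String.singleton c) 0 (fun v => v - 1))
      else none

def is_valid_word_in_hand (word : String) (hand : List (String × Int)) : Bool :=
  let hand_copy := PySem.Dict.ofList hand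
  match pvALoop word.toList hand_copy with
  | none => false
  | some d => d.values.foldl (fun flag i => if i < 0 then false else flag) true

-- ===== PORT B =====
def is_valid_word_in_hand_alt (word : String) (hand : List (String × Int)) : Bool :=
  let h := PySem.Dict.ofList hand
  let wc := PySem.Dict.counter (word.toList.map (fun c => String.singleton c))
  if wc.keys.all (fun ch => h.contains ch) then
    h.items.all (fun p => decide (wc.getD p.1 0 ≤ p.2))
  else false

-- ===== PRECONDITION & SPEC =====
def Spec_is_valid_word_in_hand (word : String) (hand : List (String × Int)) (out : Bool) : Prop := out = is_valid_word_in_hand_alt word hand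
instance (word : String) (hand : List (String × Int)) (out : Bool) : Decidable (Spec_is_valid_word_in_hand word hand out) := by unfold Spec_is_valid_word_in_hand; infer_instance

-- ===== CLAIM (what is proved, stated in full; the proofs are below) =====
def Claim_equal_is_valid_word_in_hand : Prop := ∀ (word : String) (hand : List (String × Int)), Dom_is_valid_word_in_hand word hand → Spec_is_valid_word_in_hand word hand (is_valid_word_in_hand word hand)

-- ===== LEMMAS AND PROOFS =====
-- A's final scan 'for i in values: if i < 0: flag = False' is an 'all nonnegative' check
theorem flag_foldl (l : List Int) (b : Bool) :
    l.foldl (fun flag i => if i < 0 then false else flag) b = (b && l.all (fun i => decide (0 ≤ i))) := by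
  induction l generalizing b with
  | nil => simp
  | cons x xs ih =>
    simp only [List.foldl_cons, List.all_cons, ih]
    by_cases h : x < 0
    · simp [h]
    · have h0 : (0:Int) ≤ x := by omega
      simp [h, h0]

-- modifying an existing key leaves every membership test unchanged
theorem contains_modify_sub (d : PySem.Dict String Int) (s t : String)
    (h : d.contains s = true) (f : Int → Int) :
    (d.modify s 0 f).contains t = d.contains t := by
  rw [PySem.Dict.contains_modify]
  by_cases ht : t = s
  · subst ht; simp [h]
  · simp [ht]

-- characterisation of A's loop: all letters present, and the copy holds the decremented counts
theorem aLoop_eq (cs : List Char) (d : PySem.Dict String Int) :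
    pvALoop cs d =
      if cs.all (fun c => d.contains (String.singleton c)) then
        some (cs.foldl (fun d c => d.modify (String.singleton c) 0 (fun v => v - 1)) d)
      else none := by
  induction cs generalizing d with
  | nil => simp [pvALoop]
  | cons c cs ih =>
    simp only [pvALoop, List.all_cons, List.foldl_cons]
    by_cases h : d.contains (String.singleton c) = true
    · rw [if_pos h, ih]
      have heq : ∀ t, (d.modify (String.singleton c) 0 (fun v => v - 1)).contains t = d.contains t :=
        fun t => contains_modify_sub d _ t h _
      simp [h, heq]
    · simp [h]

-- each entry of the decremented copy is the original value minus the letter's count in the word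
theorem getD_foldl_modify_sub (l : List Char) (d : PySem.Dict String Int) (k : String) :
    (l.foldl (fun d c => d.modify (String.singleton c) 0 (fun v => v - 1)) d).getD k 0
      = d.getD k 0 - ((l.map (fun c => String.singleton c)).count k : Int) := by
  induction l generalizing d with
  | nil => simp
  | cons c cs ih =>
    simp only [List.foldl_cons, List.map_cons, ih, List.count_cons]
    rw [PySem.Dict.getD_modify]
    by_cases h : k = String.singleton c
    · simp [h]; ring
    · have hne : (String.singleton c == k) = false := by
        simp only [beq_eq_false_iff_ne]; exact fun e => h e.symm
      simp [h, hne]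

-- when every decremented letter is already a key, the key list is untouched
theorem keys_foldl_modify_sub (l : List Char) (d : PySem.Dict String Int)
    (h : l.all (fun c => d.contains (String.singleton c)) = true) :
    (l.foldl (fun d c => d.modify (String.singleton c) 0 (fun v => v - 1)) d).keys = d.keys := by
  induction l generalizing d with
  | nil => simp
  | cons c cs ih =>
    simp only [List.all_cons, Bool.and_eq_true] at h
    simp only [List.foldl_cons]
    rw [ih]
    · rw [PySem.Dict.keys_modify, PySem.Dict.keys_insert_of_contains _ _ h.1]
    · simp only [List.all_eq_true] at h ⊢
      intro x hx
      rw [contains_modify_sub d _ _ h.1]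
      exact h.2 x hx

theorem ab (word : String) (hand : List (String × Int)) :
    is_valid_word_in_hand word hand = is_valid_word_in_hand_alt word hand := by
  simp only [is_valid_word_in_hand, is_valid_word_in_hand_alt, aLoop_eq]
  have hkeys : ((PySem.Dict.counter (word.toList.map (fun c => String.singleton c))).keys.all
        (fun ch => (PySem.Dict.ofList hand).contains ch))
      = word.toList.all (fun c => (PySem.Dict.ofList hand).contains (String.singleton c)) := by
    rw [Bool.eq_iff_iff]
    simp only [List.all_eq_true, PySem.Dict.keys_counter]
    constructor
    · intro h c hc
      exact h _ ((PySem.Set.mem_ofList _ _).mpr (List.mem_map_of_mem hc))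
    · intro h x hx
      rcases List.mem_map.mp ((PySem.Set.mem_ofList _ _).mp hx) with ⟨c, hc, rfl⟩
      exact h c hc
  rw [hkeys]
  by_cases hc : word.toList.all (fun c => (PySem.Dict.ofList hand).contains (String.singleton c)) = true
  · rw [if_pos hc, if_pos hc]
    have hkf := keys_foldl_modify_sub word.toList (PySem.Dict.ofList hand) hc
    have hnd : (word.toList.foldl (fun d c => d.modify (String.singleton c) 0 (fun v => v - 1))
        (PySem.Dict.ofList hand)).keys.Nodup := by
      rw [hkf]; exact PySem.Dict.nodup_keys_ofList hand
    simp only [flag_foldl, Bool.true_and,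
      PySem.Dict.values_eq_map_keys _ hnd 0,
      PySem.Dict.items_eq_map_keys _ (PySem.Dict.nodup_keys_ofList hand) 0,
      List.all_map, hkf]
    congr 1
    funext k
    simp only [Function.comp, getD_foldl_modify_sub, PySem.Dict.getD_counter]
    rw [decide_eq_decide]
    omega
  · rw [if_neg hc, if_neg hc]

-- ===== VERDICT (by name: the statement is the Claim_ definition above) =====
theorem is_valid_word_in_hand_spec : Claim_equal_is_valid_word_in_hand := by
  intro word hand _
  unfold Spec_is_valid_word_in_hand
  exact ab word hand
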